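-- pv_equiv track=rewrite | github.com/jungjiyu/codingtest_challenge | my_baekjoon1326.py | bfs
-- ===== SOURCE A (Python) =====
-- from collections import deque
--
-- def bfs(a, b, nodeValues):
--     N = len(nodeValues) - 1
--     queue = deque([a])
--     visited = [False] * (N + 1)
--     visited[a] = True
--     count = 0
--
--     while queue:
--         size = len(queue)  # 현재 레벨의 노드 개수
--         for _ in range(size):  # 현재 레벨의 모든 노드 탐색
--             curNode = queue.popleft()
--
--             if curNode == b:  # 목표 지점 도달
--                 return count
--
--             step = nodeValues[curNode]
--             for direction in [-1, 1]:  # 좌우 이동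
--                 nextNode = curNode + direction * step
--                 while 1 <= nextNode <= N:  # 가능한 모든 점프 탐색
--                     if not visited[nextNode]:
--                         visited[nextNode] = True
--                         queue.append(nextNode)
--                     nextNode += direction * step  # 같은 배수로 계속 탐색
--
--         count += 1  # 한 번의 점프 완료 후 증가
--
--     return -1  # 목표 지점 도달 불가능
-- ===== SOURCE B (Python) =====
-- def bfs(a, b, nodeValues):
--     n = len(nodeValues)
--     dist = [None] * n
--     dist[a] = 0
--     k = 0
--     while True:
--         if 0 <= b < n and dist[b] is not None:
--             return dist[b]
--         nxt = list(dist)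
--         for u in range(n):
--             if dist[u] == k:
--                 s = abs(nodeValues[u])
--                 if s != 0:
--                     r = u % s
--                     start = s if r == 0 else r
--                     for v in range(start, n, s):
--                         if nxt[v] is None and v != u:
--                             nxt[v] = k + 1
--         if nxt == dist:
--             return -1
--         dist = nxt
--         k += 1
-- ===== Notes on version B (the rewrite author's own statement) =====
-- stated objective: alternative
-- what changed: B replaces A's queue-based level BFS (deque, visited flags, two directional while-walks per node) by dynamic programming on a distance table: unit-weight Bellman-Ford rounds that scan the index array, take nodes whose table entry equals the current round as the implicit frontier, enumerate each node's jump targets arithmetically as its whole residue class modulo |step| with a single upward range, and stop when a round leaves the table unchanged, reading the answer off the table; …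
-- outside the precondition, e.g. on bfs(1, 2, [0, 3, 0]): A returns -1, B returns -1; on bfs(-1, 2, [7, 1, 1]): A returns -1, B returns 0
import Mathlib
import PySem

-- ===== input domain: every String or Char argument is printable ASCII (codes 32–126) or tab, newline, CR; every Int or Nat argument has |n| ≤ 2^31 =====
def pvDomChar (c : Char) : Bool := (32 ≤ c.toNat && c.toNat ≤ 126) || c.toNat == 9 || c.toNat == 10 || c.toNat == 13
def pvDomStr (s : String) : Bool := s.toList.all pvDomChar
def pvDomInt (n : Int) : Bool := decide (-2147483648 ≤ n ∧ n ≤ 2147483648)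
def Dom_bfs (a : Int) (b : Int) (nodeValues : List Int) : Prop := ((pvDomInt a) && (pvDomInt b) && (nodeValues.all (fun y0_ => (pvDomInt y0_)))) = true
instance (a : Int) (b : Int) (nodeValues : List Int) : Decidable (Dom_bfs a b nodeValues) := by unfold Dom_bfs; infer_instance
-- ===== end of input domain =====

-- B replaces A's queue-based level BFS (deque, visited flags, two directional while-walks per
-- node) by dynamic programming on a distance table: unit-weight Bellman-Ford rounds whose
-- implicit frontier is 'table entry = round number', with each node's jump targets enumerated
-- as one residue class modulo |step| by a single upward range, stopping when a round leaves
-- the table unchanged (alternative decomposition; similar cost). Return value only.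

-- ===== PORT A =====
-- inner 'while 1 <= nextNode <= N' walk (fuel-bounded; fuel len+1 always suffices on Pre_)
def bfsWalk (N st : Int) : Nat → Int → List Bool × List Int → List Bool × List Int
  | 0, _, vq => vq
  | fuel+1, next, vq =>
    if 1 ≤ next ∧ next ≤ N then
      bfsWalk N st fuel (next + st)
        (if PySem.List.pyGetD vq.1 next false = false
         then (PySem.List.pySetD vq.1 next true, vq.2 ++ [next])
         else vq)
    else vq

-- the 'for _ in range(size)' pass over one level; none = 'return count' was hit
def bfsLevel (b N : Int) (nv : List Int) (wf : Nat) :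
    List Int → List Int → List Bool → Option (List Int × List Bool)
  | [], rest, visited => some (rest, visited)
  | cur :: lv, rest, visited =>
    if cur = b then none
    else
      let step := PySem.List.pyGetD nv cur 0
      let vq1 := bfsWalk N (-step) wf (cur + -step) (visited, rest)
      let vq2 := bfsWalk N step wf (cur + step) vq1
      bfsLevel b N nv wf lv vq2.2 vq2.1

-- the 'while queue' loop (fuel-bounded; fuel len+2 always suffices on Pre_)
def bfsLoop (b N : Int) (nv : List Int) (wf : Nat) : Nat → List Int → List Bool → Int → Int
  | 0, _, _, _ => -1
  | fuel+1, queue, visited, count =>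
    if queue.isEmpty then -1
    else
      match bfsLevel b N nv wf queue [] visited with
      | none => count
      | some (queue', visited') => bfsLoop b N nv wf fuel queue' visited' (count + 1)

def bfs (a : Int) (b : Int) (nodeValues : List Int) : Int :=
  let N : Int := (nodeValues.length : Int) - 1
  let visited := PySem.List.pySetD (List.replicate nodeValues.length false) a true
  bfsLoop b N nodeValues (nodeValues.length + 1) (nodeValues.length + 2) [a] visited 0

-- ===== PORT B =====
-- 'if nxt[v] is None and v != u: nxt[v] = k + 1' — body of B's innermost for
def altMark (u k : Int) (nxt : List (Option Int)) (v : Int) : List (Option Int) :=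
  if PySem.List.pyGetD nxt v none = none ∧ v ≠ u then PySem.List.pySetD nxt v (some (k+1)) else nxt

-- 'if dist[u] == k: s = abs(..); if s != 0: …; for v in range(start, n, s): …'
def altBody (nv : List Int) (n k : Int) (dist : List (Option Int))
    (nxt : List (Option Int)) (u : Int) : List (Option Int) :=
  if PySem.List.pyGetD dist u none = some k then
    let s := |PySem.List.pyGetD nv u 0|
    if s ≠ 0 then
      let r := PySem.Int.mod u s
      let start := if r = 0 then s else r
      (PySem.List.pyRange start n s).foldl (altMark u k) nxt
    else nxt
  else nxt

-- 'nxt = list(dist); for u in range(n): …'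
def altRound (nv : List Int) (n k : Int) (dist : List (Option Int)) : List (Option Int) :=
  (PySem.List.pyRange 0 n 1).foldl (altBody nv n k dist) dist

-- 'while True: if 0 <= b < n and dist[b] is not None: return dist[b]; …'
-- (fuel-bounded; the table grows strictly each non-returning round, so fuel len+2 suffices)
def altLoop (b n : Int) (nv : List Int) : Nat → List (Option Int) → Int → Int
  | 0, _, _ => -1
  | fuel+1, dist, k =>
    match (if 0 ≤ b ∧ b < n then PySem.List.pyGetD dist b none else none) with
    | some d => d
    | none =>
      let nxt := altRound nv n k dist
      if nxt = dist then -1 else altLoop b n nv fuel nxt (k+1)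

def bfs_alt (a : Int) (b : Int) (nodeValues : List Int) : Int :=
  let n : Int := (nodeValues.length : Int)
  let dist := PySem.List.pySetD (List.replicate nodeValues.length (none : Option Int)) a (some 0)
  altLoop b n nodeValues (nodeValues.length + 2) dist 0

-- ===== PRECONDITION & SPEC =====
-- Pre_ restricts to the task's natural domain: the start index a must be a valid nonnegative
-- index (a negative a only returns through Python's negative-index wraparound of visited[a],
-- outside the number-line domain of the problem; a out of range raises IndexError), and no
-- jump value after the head may be 0 — Python A loops forever when a zero-step position is
-- reachable, and reachability is not closed-form, so all such lists are excluded even though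
-- A still returns -1 when the zero-step position is unreachable.
def Pre_bfs (a : Int) (b : Int) (nodeValues : List Int) : Prop :=
  0 ≤ a ∧ a < (nodeValues.length : Int) ∧ ∀ v ∈ nodeValues.tail, v ≠ 0
instance (a : Int) (b : Int) (nodeValues : List Int) : Decidable (Pre_bfs a b nodeValues) := by
  unfold Pre_bfs; infer_instance
def pvWitness_bfs : Int × Int × List Int := (1, 2, [9, 1, 1])

def Spec_bfs (a : Int) (b : Int) (nodeValues : List Int) (out : Int) : Prop := out = bfs_alt a b nodeValues
instance (a : Int) (b : Int) (nodeValues : List Int) (out : Int) : Decidable (Spec_bfs a b nodeValues out) := by unfold Spec_bfs; infer_instance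

-- ===== CLAIM (what is proved, stated in full; the proofs are below) =====
def Claim_equal_bfs : Prop := ∀ (a : Int) (b : Int) (nodeValues : List Int), Dom_bfs a b nodeValues → Pre_bfs a b nodeValues → Spec_bfs a b nodeValues (bfs a b nodeValues)

-- ===== LEMMAS AND PROOFS =====

-- shorthands used only by the proofs
def gB (vis : List Bool) (x : Int) : Bool := PySem.List.pyGetD vis x false
def gD (dist : List (Option Int)) (x : Int) : Option Int := PySem.List.pyGetD dist x none

-- the jump relation: x is reachable from u in one jump (both programs' edge set)
abbrev pvTarg (nv : List Int) (n u x : Int) : Prop :=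
  1 ≤ x ∧ x < n ∧ x ≠ u ∧ PySem.List.pyGetD nv u 0 ≠ 0 ∧ |PySem.List.pyGetD nv u 0| ∣ (x - u)

-- lockstep invariant between A's (queue, visited, count) and B's (dist, k)
def pvInv (b n : Int) (queue : List Int) (vis : List Bool) (dist : List (Option Int)) (k : Int) : Prop :=
  ((vis.length : Int) = n) ∧ ((dist.length : Int) = n) ∧ 0 ≤ k ∧
  (∀ x : Int, 0 ≤ x → x < n → (gB vis x = true ↔ gD dist x ≠ none)) ∧
  (∀ x : Int, 0 ≤ x → x < n → (gD dist x = some k ↔ x ∈ queue)) ∧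
  (∀ x ∈ queue, 0 ≤ x ∧ x < n) ∧
  (∀ x j : Int, 0 ≤ x → x < n → gD dist x = some j → 0 ≤ j ∧ j ≤ k) ∧
  (0 ≤ b → b < n → gD dist b = none ∨ b ∈ queue)

theorem pv_getD_setD {α : Type} (l : List α) (i x : Int) (v d : α)
    (hi0 : 0 ≤ i) (hil : i < (l.length : Int)) (hx0 : 0 ≤ x) (hxl : x < (l.length : Int)) :
    PySem.List.pyGetD (PySem.List.pySetD l i v) x d = if x = i then v else PySem.List.pyGetD l x d := by
  have hi : i = ((i.toNat : Nat) : Int) := by omega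
  have hx : x = ((x.toNat : Nat) : Int) := by omega
  rw [hi, hx, PySem.List.pyGetD_pySetD_natCast _ _ _ _ _ (by omega)]
  by_cases h : x.toNat = i.toNat
  · rw [if_pos h, if_pos (by omega)]
  · rw [if_neg h, if_neg (by omega)]

theorem pv_eq_of_getD {dist nxt : List (Option Int)} (hl : nxt.length = dist.length)
    (h : ∀ x : Int, 0 ≤ x → x < (dist.length : Int) → gD nxt x = gD dist x) : nxt = dist := by
  apply List.ext_getElem hl
  intro i h1 h2
  have hx := h i (by omega) (by exact_mod_cast h2)
  unfold gD at hx
  rw [PySem.List.pyGetD_eq_getElem _ _ (by omega) (by exact_mod_cast h1),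
      PySem.List.pyGetD_eq_getElem _ _ (by omega) (by exact_mod_cast h2)] at hx
  simpa using hx

-- ---- generic range lemmas (general step) ----
theorem pvRange_cons_pos {a b s : Int} (hs : 0 < s) (h : a < b) :
    PySem.List.pyRange a b s = a :: PySem.List.pyRange (a + s) b s := by
  have h0 : s ≠ 0 := by omega
  rw [PySem.List.pyRange_of_pos _ _ hs, PySem.List.pyRange_of_pos _ _ hs, if_pos h]
  have key : b - a + s - 1 = (b - (a + s) + s - 1) + 1 * s := by ring
  have hdiv : (b - a + s - 1) / s = (b - (a + s) + s - 1) / s + 1 := by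
    rw [key, Int.add_mul_ediv_right _ _ h0]
  by_cases h2 : a + s < b
  · have hn : 0 ≤ (b - (a + s) + s - 1) / s := Int.ediv_nonneg (by omega) (by omega)
    rw [if_pos h2, hdiv]
    have ht : ((b - (a + s) + s - 1) / s + 1).toNat = ((b - (a + s) + s - 1) / s).toNat + 1 := by
      omega
    rw [ht, List.range_succ_eq_map, List.map_cons, List.map_map]
    congr 1
    · push_cast; ring
    · refine List.map_congr_left fun k _ => ?_
      simp only [Function.comp_apply]
      push_cast; ring
  · have hz : (b - (a + s) + s - 1) / s = 0 := Int.ediv_eq_zero_of_lt (by omega) (by omega)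
    rw [if_neg h2, hdiv, hz]
    norm_num

theorem pvRange_nil_pos {a b s : Int} (hs : 0 < s) (h : b ≤ a) :
    PySem.List.pyRange a b s = [] := by
  have h0 : ¬ s = 0 := by omega
  simp [PySem.List.pyRange, h0, hs, show ¬ a < b by omega]

theorem pvRange_of_neg {a b s : Int} (hs : s < 0) :
    PySem.List.pyRange a b s =
      List.map (fun k : Nat => a + s * (k : Int))
        (List.range (if b < a then ((a - b + -s - 1) / -s).toNat else 0)) := by
  have h0 : ¬ s = 0 := by omega
  have h1 : ¬ 0 < s := by omega
  unfold PySem.List.pyRange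
  rw [if_neg h0, if_neg h1]

theorem pvRange_cons_neg {a b s : Int} (hs : s < 0) (h : b < a) :
    PySem.List.pyRange a b s = a :: PySem.List.pyRange (a + s) b s := by
  have h0 : -s ≠ 0 := by omega
  rw [pvRange_of_neg hs, pvRange_of_neg hs, if_pos h]
  have key : a - b + -s - 1 = (a + s - b + -s - 1) + 1 * -s := by ring
  have hdiv : (a - b + -s - 1) / -s = (a + s - b + -s - 1) / -s + 1 := by
    rw [key, Int.add_mul_ediv_right _ _ h0]
  by_cases h2 : b < a + s
  · have hn : 0 ≤ (a + s - b + -s - 1) / -s := Int.ediv_nonneg (by omega) (by omega)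
    rw [if_pos h2, hdiv]
    have ht : ((a + s - b + -s - 1) / -s + 1).toNat = ((a + s - b + -s - 1) / -s).toNat + 1 := by
      omega
    rw [ht, List.range_succ_eq_map, List.map_cons, List.map_map]
    congr 1
    · push_cast; ring
    · refine List.map_congr_left fun k _ => ?_
      simp only [Function.comp_apply]
      push_cast; ring
  · have hz : (a + s - b + -s - 1) / -s = 0 := Int.ediv_eq_zero_of_lt (by omega) (by omega)
    rw [if_neg h2, hdiv, hz]
    norm_num

theorem pvRange_nil_neg {a b s : Int} (hs : s < 0) (h : a ≤ b) :
    PySem.List.pyRange a b s = [] := by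
  simp [pvRange_of_neg hs, show ¬ b < a by omega]

theorem pvRange_len_pos {a b s : Int} (hs : 0 < s) :
    (PySem.List.pyRange a b s).length ≤ (b - a).toNat := by
  rw [PySem.List.pyRange_of_pos _ _ hs]
  simp only [List.length_map, List.length_range]
  split_ifs with h
  · have c1 : (b - a + s - 1) / s < (b - a) + 1 := by
      rw [Int.ediv_lt_iff_lt_mul hs]
      nlinarith
    have c0 : 0 ≤ (b - a + s - 1) / s := Int.ediv_nonneg (by omega) (by omega)
    omega
  · omega

theorem pvRange_len_neg {a b s : Int} (hs : s < 0) :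
    (PySem.List.pyRange a b s).length ≤ (a - b).toNat := by
  rw [pvRange_of_neg hs]
  simp only [List.length_map, List.length_range]
  split_ifs with h
  · have c1 : (a - b + -s - 1) / -s < (a - b) + 1 := by
      rw [Int.ediv_lt_iff_lt_mul (by omega)]
      nlinarith
    have c0 : 0 ≤ (a - b + -s - 1) / -s := Int.ediv_nonneg (by omega) (by omega)
    omega
  · omega

-- ---- A's inner walk = fold of pvStep over a range ----
def pvStep (sv : List Bool × List Int) (v : Int) : List Bool × List Int :=
  if PySem.List.pyGetD sv.1 v false = false
  then (PySem.List.pySetD sv.1 v true, sv.2 ++ [v])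
  else sv

theorem pvWalk_eq_pos {N st : Int} (hst : 0 < st) :
    ∀ (fuel : Nat) (x : Int) (vq : List Bool × List Int), 1 ≤ x →
      (PySem.List.pyRange x (N + 1) st).length < fuel →
      bfsWalk N st fuel x vq = (PySem.List.pyRange x (N + 1) st).foldl pvStep vq := by
  intro fuel
  induction fuel with
  | zero => intro x vq h1 hlen; omega
  | succ f ih =>
    intro x vq h1 hlen
    by_cases hx : x ≤ N
    · rw [pvRange_cons_pos hst (by omega : x < N + 1)] at hlen ⊢
      rw [List.foldl_cons]
      rw [bfsWalk, if_pos ⟨h1, hx⟩]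
      exact ih (x + st) (pvStep vq x) (by omega)
        (by simpa using Nat.lt_of_succ_lt_succ (by simpa using hlen))
    · rw [pvRange_nil_pos hst (by omega)]
      rw [bfsWalk, if_neg (by omega : ¬(1 ≤ x ∧ x ≤ N))]
      rfl

theorem pvWalk_eq_neg {N st : Int} (hst : st < 0) :
    ∀ (fuel : Nat) (x : Int) (vq : List Bool × List Int), x ≤ N →
      (PySem.List.pyRange x 0 st).length < fuel →
      bfsWalk N st fuel x vq = (PySem.List.pyRange x 0 st).foldl pvStep vq := by
  intro fuel
  induction fuel with
  | zero => intro x vq h1 hlen; omega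
  | succ f ih =>
    intro x vq h1 hlen
    by_cases hx : 1 ≤ x
    · rw [pvRange_cons_neg hst (by omega : (0:Int) < x)] at hlen ⊢
      rw [List.foldl_cons]
      rw [bfsWalk, if_pos ⟨hx, h1⟩]
      exact ih (x + st) (pvStep vq x) (by omega)
        (by simpa using Nat.lt_of_succ_lt_succ (by simpa using hlen))
    · rw [pvRange_nil_neg hst (by omega)]
      rw [bfsWalk, if_neg (by omega : ¬(1 ≤ x ∧ x ≤ N))]
      rfl

theorem pvWalk_zero {N : Int} :
    ∀ (fuel : Nat) (x : Int) (vq : List Bool × List Int),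
      (1 ≤ x → x ≤ N → PySem.List.pyGetD vq.1 x false = true) →
      bfsWalk N 0 fuel x vq = vq := by
  intro fuel
  induction fuel with
  | zero => intro x vq _; rfl
  | succ f ih =>
    intro x vq hm
    rw [bfsWalk]
    by_cases hg : 1 ≤ x ∧ x ≤ N
    · rw [if_pos hg, hm hg.1 hg.2]
      simp only [Bool.true_eq_false, if_false, add_zero]
      exact ih x vq hm
    · rw [if_neg hg]


-- Bool helper
theorem pvBoolFalse {b : Bool} (h : ¬ b = true) : b = false := by
  cases b with
  | false => rfl
  | true => exact absurd rfl h

-- gB / gD views of pySetD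
theorem pv_gB_setD (vis : List Bool) (i x : Int) (v : Bool)
    (hi0 : 0 ≤ i) (hil : i < (vis.length : Int)) (hx0 : 0 ≤ x) (hxl : x < (vis.length : Int)) :
    gB (PySem.List.pySetD vis i v) x = if x = i then v else gB vis x :=
  pv_getD_setD vis i x v false hi0 hil hx0 hxl

theorem pv_gD_setD (d : List (Option Int)) (i x : Int) (v : Option Int)
    (hi0 : 0 ≤ i) (hil : i < (d.length : Int)) (hx0 : 0 ≤ x) (hxl : x < (d.length : Int)) :
    gD (PySem.List.pySetD d i v) x = if x = i then v else gD d x :=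
  pv_getD_setD d i x v none hi0 hil hx0 hxl

-- Python '%' with a positive divisor is emod
theorem pvModPos (u m : Int) (hm : 0 ≤ m) : PySem.Int.mod u m = u % m := by
  show Int.fmod u m = u % m
  rw [Int.fmod_eq_emod]
  simp [hm]

-- ---- characterisation of a pvStep fold over an arbitrary target list ----
theorem pvStepFold_char (L : List Int) :
    ∀ (vis : List Bool) (q : List Int), (∀ v ∈ L, 0 ≤ v ∧ v < (vis.length : Int)) →
      ((L.foldl pvStep (vis, q)).1.length = vis.length) ∧
      (∀ x : Int, 0 ≤ x → x < (vis.length : Int) →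
        (gB (L.foldl pvStep (vis, q)).1 x = true ↔ gB vis x = true ∨ x ∈ L)) ∧
      (∀ x : Int, x ∈ (L.foldl pvStep (vis, q)).2 ↔ x ∈ q ∨ (gB vis x = false ∧ x ∈ L)) := by
  induction L with
  | nil => intro vis q _; refine ⟨rfl, fun x _ _ => by simp, fun x => by simp⟩
  | cons v L ih =>
    intro vis q hL
    obtain ⟨hv0, hvl⟩ := hL v List.mem_cons_self
    by_cases hvis : gB vis v = false
    · have hstep : pvStep (vis, q) v = (PySem.List.pySetD vis v true, q ++ [v]) := by
        have h := hvis
        unfold gB at h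
        simp [pvStep, h]
      rw [List.foldl_cons, hstep]
      have hlen' : (PySem.List.pySetD vis v true).length = vis.length :=
        PySem.List.length_pySetD _ _ _
      obtain ⟨ih1, ih2, ih3⟩ := ih (PySem.List.pySetD vis v true) (q ++ [v])
        (fun w hw => by rw [hlen']; exact hL w (List.mem_cons_of_mem _ hw))
      refine ⟨by rw [ih1, hlen'], ?_, ?_⟩
      · intro x hx0 hxl
        rw [ih2 x hx0 (by rw [hlen']; exact hxl),
            pv_gB_setD vis v x true hv0 hvl hx0 hxl]
        by_cases hxv : x = v
        · subst hxv
          simp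
        · rw [if_neg hxv]
          simp [List.mem_cons, hxv]
      · intro x
        rw [ih3 x]
        by_cases hxL : x ∈ L
        · obtain ⟨hx0, hxl⟩ := hL x (List.mem_cons_of_mem _ hxL)
          rw [pv_gB_setD vis v x true hv0 hvl hx0 hxl]
          by_cases hxv : x = v
          · subst hxv
            simp [hvis, hxL, List.mem_append]
          · rw [if_neg hxv]
            simp [List.mem_cons, List.mem_append, hxv, hxL]
        · by_cases hxv : x = v
          · subst hxv
            simp [hvis, hxL, List.mem_append]
          · simp [List.mem_cons, List.mem_append, hxv, hxL]
    · have hvis' : gB vis v = true := by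
        cases h : gB vis v
        · exact absurd h hvis
        · rfl
      have hstep : pvStep (vis, q) v = (vis, q) := by
        have h := hvis'
        unfold gB at h
        simp [pvStep, h]
      rw [List.foldl_cons, hstep]
      obtain ⟨ih1, ih2, ih3⟩ := ih vis q (fun w hw => hL w (List.mem_cons_of_mem _ hw))
      refine ⟨ih1, ?_, ?_⟩
      · intro x hx0 hxl
        rw [ih2 x hx0 hxl]
        by_cases hxv : x = v
        · subst hxv
          simp [hvis']
        · simp [hxv, List.mem_cons]
      · intro x
        rw [ih3 x]
        by_cases hxv : x = v
        · subst hxv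
          simp [hvis']
        · simp [hxv, List.mem_cons]

-- ---- the union of A's two walks from u covers exactly pvTarg u ----
theorem pvMemUnion_pos (nv : List Int) (n u x : Int) (hu0 : 0 ≤ u) (hun : u < n)
    (hpos : 0 < PySem.List.pyGetD nv u 0) :
    (x ∈ PySem.List.pyRange (u + -(PySem.List.pyGetD nv u 0)) 0 (-(PySem.List.pyGetD nv u 0)) ∨
     x ∈ PySem.List.pyRange (u + PySem.List.pyGetD nv u 0) ((n-1)+1) (PySem.List.pyGetD nv u 0)) ↔
    pvTarg nv n u x := by
  set s := PySem.List.pyGetD nv u 0 with hsdef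
  have hss : -s ∣ s := ⟨-1, by ring⟩
  unfold pvTarg
  rw [PySem.List.mem_pyRange_iff_of_neg (by omega : -s < 0) x,
      PySem.List.mem_pyRange_iff_of_pos hpos x]
  have habs : |s| = s := abs_of_pos hpos
  constructor
  · rintro (⟨h1, h2, h3⟩ | ⟨h1, h2, h3⟩)
    · have he : x - (u + -s) = (x - u) + s := by ring
      rw [he] at h3
      have hd : s ∣ x - u := by
        have := dvd_sub ((neg_dvd).mp h3) (dvd_refl s)
        simpa using this
      exact ⟨by omega, by omega, by omega, by omega, habs ▸ hd⟩
    · have he : x - (u + s) = (x - u) + -s := by ring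
      rw [he] at h3
      have hd : s ∣ x - u := by
        have := dvd_add h3 (dvd_refl s)
        simpa using this
      exact ⟨by omega, by omega, by omega, by omega, habs ▸ hd⟩
  · rintro ⟨h1, h2, h3, _, h4⟩
    have hd : s ∣ x - u := (abs_dvd _ _).mp h4
    rcases lt_or_gt_of_ne h3 with hlt | hgt
    · -- x < u : first (downward) range
      left
      have hdd : s ∣ u - x := dvd_sub_comm.mp hd
      have hle : s ≤ u - x := Int.le_of_dvd (by omega) hdd
      refine ⟨by omega, by omega, ?_⟩
      have he : x - (u + -s) = (x - u) + s := by ring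
      rw [he]
      exact dvd_add ((neg_dvd).mpr hd) hss
    · -- x > u : second (upward) range
      right
      have hle : s ≤ x - u := Int.le_of_dvd (by omega) hd
      refine ⟨by omega, by omega, ?_⟩
      have he : x - (u + s) = (x - u) + -s := by ring
      rw [he]
      exact dvd_add hd (dvd_neg.mpr (dvd_refl s))

theorem pvMemUnion_neg (nv : List Int) (n u x : Int) (hu0 : 0 ≤ u) (hun : u < n)
    (hneg : PySem.List.pyGetD nv u 0 < 0) :
    (x ∈ PySem.List.pyRange (u + -(PySem.List.pyGetD nv u 0)) ((n-1)+1) (-(PySem.List.pyGetD nv u 0)) ∨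
     x ∈ PySem.List.pyRange (u + PySem.List.pyGetD nv u 0) 0 (PySem.List.pyGetD nv u 0)) ↔
    pvTarg nv n u x := by
  set s := PySem.List.pyGetD nv u 0 with hsdef
  have hss : -s ∣ s := ⟨-1, by ring⟩
  unfold pvTarg
  rw [PySem.List.mem_pyRange_iff_of_pos (by omega : (0:Int) < -s) x,
      PySem.List.mem_pyRange_iff_of_neg hneg x]
  have habs : |s| = -s := abs_of_neg hneg
  constructor
  · rintro (⟨h1, h2, h3⟩ | ⟨h1, h2, h3⟩)
    · have he : x - (u + -s) = (x - u) + s := by ring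
      rw [he] at h3
      have hd : s ∣ x - u := by
        have := dvd_sub ((neg_dvd).mp h3) (dvd_refl s)
        simpa using this
      exact ⟨by omega, by omega, by omega, by omega, habs ▸ (neg_dvd).mpr hd⟩
    · have he : x - (u + s) = (x - u) + -s := by ring
      rw [he] at h3
      have hd : s ∣ x - u := by
        have := dvd_add h3 (dvd_refl s)
        simpa using this
      exact ⟨by omega, by omega, by omega, by omega, habs ▸ (neg_dvd).mpr hd⟩
  · rintro ⟨h1, h2, h3, _, h4⟩
    have hd : s ∣ x - u := (abs_dvd _ _).mp h4
    have hdneg : -s ∣ x - u := (neg_dvd).mpr hd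
    rcases lt_or_gt_of_ne h3 with hlt | hgt
    · -- x < u : second (downward) range
      right
      have hdd : s ∣ u - x := dvd_sub_comm.mp hd
      have hle : -s ≤ u - x := Int.le_of_dvd (by omega) ((neg_dvd).mpr hdd)
      refine ⟨by omega, by omega, ?_⟩
      have he : x - (u + s) = (x - u) + -s := by ring
      rw [he]
      exact dvd_add hd (dvd_neg.mpr (dvd_refl s))
    · -- x > u : first (upward) range
      left
      have hle : -s ≤ x - u := Int.le_of_dvd (by omega) hdneg
      refine ⟨by omega, by omega, ?_⟩
      have he : x - (u + -s) = (x - u) + s := by ring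
      rw [he]
      exact dvd_add hdneg hss


-- ---- per-node expansion characterisation for A ----
theorem pvExpandChar (nv : List Int) (n u : Int) (vis : List Bool) (q : List Int)
    (hn : (vis.length : Int) = n) (hu0 : 0 ≤ u) (hun : u < n)
    (hvisu : gB vis u = true) :
    ((bfsWalk (n-1) (PySem.List.pyGetD nv u 0) (vis.length + 1)
        (u + PySem.List.pyGetD nv u 0)
        (bfsWalk (n-1) (-(PySem.List.pyGetD nv u 0)) (vis.length + 1)
          (u + -(PySem.List.pyGetD nv u 0)) (vis, q))).1.length = vis.length) ∧
    (∀ x : Int, 0 ≤ x → x < n →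
      (gB (bfsWalk (n-1) (PySem.List.pyGetD nv u 0) (vis.length + 1)
        (u + PySem.List.pyGetD nv u 0)
        (bfsWalk (n-1) (-(PySem.List.pyGetD nv u 0)) (vis.length + 1)
          (u + -(PySem.List.pyGetD nv u 0)) (vis, q))).1 x = true ↔
        gB vis x = true ∨ pvTarg nv n u x)) ∧
    (∀ x : Int, x ∈ (bfsWalk (n-1) (PySem.List.pyGetD nv u 0) (vis.length + 1)
        (u + PySem.List.pyGetD nv u 0)
        (bfsWalk (n-1) (-(PySem.List.pyGetD nv u 0)) (vis.length + 1)
          (u + -(PySem.List.pyGetD nv u 0)) (vis, q))).2 ↔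
        x ∈ q ∨ (gB vis x = false ∧ pvTarg nv n u x)) := by
  rcases lt_trichotomy (PySem.List.pyGetD nv u 0) 0 with hneg | hzero | hpos
  · -- s < 0 : first walk up (stride -s > 0), second down (stride s < 0)
    have hw1 : bfsWalk (n-1) (-(PySem.List.pyGetD nv u 0)) (vis.length + 1)
        (u + -(PySem.List.pyGetD nv u 0)) (vis, q) =
        (PySem.List.pyRange (u + -(PySem.List.pyGetD nv u 0)) ((n-1)+1)
          (-(PySem.List.pyGetD nv u 0))).foldl pvStep (vis, q) :=
      pvWalk_eq_pos (by omega) _ _ _ (by omega)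
        (by have := pvRange_len_pos (a := u + -(PySem.List.pyGetD nv u 0)) (b := (n-1)+1)
              (by omega : (0:Int) < -(PySem.List.pyGetD nv u 0))
            omega)
    set L1 := PySem.List.pyRange (u + -(PySem.List.pyGetD nv u 0)) ((n-1)+1)
      (-(PySem.List.pyGetD nv u 0)) with hL1
    set L2 := PySem.List.pyRange (u + PySem.List.pyGetD nv u 0) 0
      (PySem.List.pyGetD nv u 0) with hL2
    have hL1mem : ∀ v ∈ L1, 0 ≤ v ∧ v < (vis.length : Int) := by
      intro v hv
      rw [hL1, PySem.List.mem_pyRange_iff_of_pos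
        (by omega : (0:Int) < -(PySem.List.pyGetD nv u 0)) v] at hv
      omega
    obtain ⟨c1len, c1vis, c1mem⟩ := pvStepFold_char L1 vis q hL1mem
    have hL2mem : ∀ v ∈ L2, 0 ≤ v ∧ v < (vis.length : Int) := by
      intro v hv
      rw [hL2, PySem.List.mem_pyRange_iff_of_neg hneg v] at hv
      omega
    have hw2 : bfsWalk (n-1) (PySem.List.pyGetD nv u 0) (vis.length + 1)
        (u + PySem.List.pyGetD nv u 0)
        ((L1.foldl pvStep (vis, q)).1, (L1.foldl pvStep (vis, q)).2) =
        L2.foldl pvStep ((L1.foldl pvStep (vis, q)).1, (L1.foldl pvStep (vis, q)).2) := by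
      rw [hL2]
      exact pvWalk_eq_neg hneg _ _ _ (by omega)
        (by have := pvRange_len_neg (a := u + PySem.List.pyGetD nv u 0) (b := 0) hneg
            omega)
    obtain ⟨c2len, c2vis, c2mem⟩ := pvStepFold_char L2 (L1.foldl pvStep (vis, q)).1
      (L1.foldl pvStep (vis, q)).2 (by rw [c1len]; exact hL2mem)
    have hsplit : ∀ x : Int, pvTarg nv n u x ↔ (x ∈ L2 ∨ x ∈ L1) := by
      intro x
      rw [hL1, hL2]
      have h := pvMemUnion_neg nv n u x hu0 hun hneg
      tauto
    rw [hw1]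
    have hpair : L1.foldl pvStep (vis, q) =
        ((L1.foldl pvStep (vis, q)).1, (L1.foldl pvStep (vis, q)).2) := rfl
    rw [hpair, hw2]
    refine ⟨by rw [c2len, c1len], ?_, ?_⟩
    · intro x hx0 hxl
      rw [c2vis x hx0 (by rw [c1len]; omega), c1vis x hx0 (by omega), hsplit x]
      tauto
    · intro x
      rw [c2mem x, c1mem x, hsplit x]
      by_cases hxL1 : x ∈ L1
      · obtain ⟨hx0, hxl⟩ := hL1mem x hxL1
        have hft : gB (L1.foldl pvStep (vis, q)).1 x = true :=
          (c1vis x hx0 hxl).mpr (Or.inr hxL1)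
        by_cases hv : gB vis x = true
        · simp [hft, hv, hxL1]
        · simp [hft, pvBoolFalse hv, hxL1]
      · by_cases hxL2 : x ∈ L2
        · obtain ⟨hx0, hxl⟩ := hL2mem x hxL2
          by_cases hv : gB vis x = true
          · have hft : gB (L1.foldl pvStep (vis, q)).1 x = true :=
              (c1vis x hx0 hxl).mpr (Or.inl hv)
            simp [hft, hv, hxL1, hxL2]
          · have hff : gB (L1.foldl pvStep (vis, q)).1 x = false := by
              apply pvBoolFalse
              intro h
              rcases (c1vis x hx0 hxl).mp h with hc | hc
              · exact hv hc
              · exact hxL1 hc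
            simp [hff, pvBoolFalse hv, hxL1, hxL2]
        · simp [hxL1, hxL2]
  · -- s = 0 : both walks are no-ops (u itself is visited, nothing else is reachable)
    have h1 : bfsWalk (n-1) (-(PySem.List.pyGetD nv u 0)) (vis.length + 1)
        (u + -(PySem.List.pyGetD nv u 0)) (vis, q) = (vis, q) := by
      rw [hzero]
      simp only [neg_zero, add_zero]
      exact pvWalk_zero _ u (vis, q) (fun _ _ => hvisu)
    have h2 : bfsWalk (n-1) (PySem.List.pyGetD nv u 0) (vis.length + 1)
        (u + PySem.List.pyGetD nv u 0) (vis, q) = (vis, q) := by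
      rw [hzero]
      simp only [add_zero]
      exact pvWalk_zero _ u (vis, q) (fun _ _ => hvisu)
    rw [h1, h2]
    have hT : ∀ x : Int, ¬ pvTarg nv n u x := by
      intro x hx
      exact hx.2.2.2.1 hzero
    refine ⟨rfl, ?_, ?_⟩
    · intro x _ _
      simp [hT x]
    · intro x
      simp [hT x]
  · -- s > 0 : first walk down (stride -s < 0), second up (stride s > 0)
    have hw1 : bfsWalk (n-1) (-(PySem.List.pyGetD nv u 0)) (vis.length + 1)
        (u + -(PySem.List.pyGetD nv u 0)) (vis, q) =
        (PySem.List.pyRange (u + -(PySem.List.pyGetD nv u 0)) 0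
          (-(PySem.List.pyGetD nv u 0))).foldl pvStep (vis, q) :=
      pvWalk_eq_neg (by omega) _ _ _ (by omega)
        (by have := pvRange_len_neg (a := u + -(PySem.List.pyGetD nv u 0)) (b := 0)
              (by omega : -(PySem.List.pyGetD nv u 0) < 0)
            omega)
    set L1 := PySem.List.pyRange (u + -(PySem.List.pyGetD nv u 0)) 0
      (-(PySem.List.pyGetD nv u 0)) with hL1
    set L2 := PySem.List.pyRange (u + PySem.List.pyGetD nv u 0) ((n-1)+1)
      (PySem.List.pyGetD nv u 0) with hL2
    have hL1mem : ∀ v ∈ L1, 0 ≤ v ∧ v < (vis.length : Int) := by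
      intro v hv
      rw [hL1, PySem.List.mem_pyRange_iff_of_neg
        (by omega : -(PySem.List.pyGetD nv u 0) < 0) v] at hv
      omega
    obtain ⟨c1len, c1vis, c1mem⟩ := pvStepFold_char L1 vis q hL1mem
    have hL2mem : ∀ v ∈ L2, 0 ≤ v ∧ v < (vis.length : Int) := by
      intro v hv
      rw [hL2, PySem.List.mem_pyRange_iff_of_pos hpos v] at hv
      omega
    have hw2 : bfsWalk (n-1) (PySem.List.pyGetD nv u 0) (vis.length + 1)
        (u + PySem.List.pyGetD nv u 0)
        ((L1.foldl pvStep (vis, q)).1, (L1.foldl pvStep (vis, q)).2) =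
        L2.foldl pvStep ((L1.foldl pvStep (vis, q)).1, (L1.foldl pvStep (vis, q)).2) := by
      rw [hL2]
      exact pvWalk_eq_pos hpos _ _ _ (by omega)
        (by have := pvRange_len_pos (a := u + PySem.List.pyGetD nv u 0) (b := (n-1)+1) hpos
            omega)
    obtain ⟨c2len, c2vis, c2mem⟩ := pvStepFold_char L2 (L1.foldl pvStep (vis, q)).1
      (L1.foldl pvStep (vis, q)).2 (by rw [c1len]; exact hL2mem)
    have hsplit : ∀ x : Int, pvTarg nv n u x ↔ (x ∈ L2 ∨ x ∈ L1) := by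
      intro x
      rw [hL1, hL2]
      have h := pvMemUnion_pos nv n u x hu0 hun hpos
      tauto
    rw [hw1]
    have hpair : L1.foldl pvStep (vis, q) =
        ((L1.foldl pvStep (vis, q)).1, (L1.foldl pvStep (vis, q)).2) := rfl
    rw [hpair, hw2]
    refine ⟨by rw [c2len, c1len], ?_, ?_⟩
    · intro x hx0 hxl
      rw [c2vis x hx0 (by rw [c1len]; omega), c1vis x hx0 (by omega), hsplit x]
      tauto
    · intro x
      rw [c2mem x, c1mem x, hsplit x]
      by_cases hxL1 : x ∈ L1
      · obtain ⟨hx0, hxl⟩ := hL1mem x hxL1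
        have hft : gB (L1.foldl pvStep (vis, q)).1 x = true :=
          (c1vis x hx0 hxl).mpr (Or.inr hxL1)
        by_cases hv : gB vis x = true
        · simp [hft, hv, hxL1]
        · simp [hft, pvBoolFalse hv, hxL1]
      · by_cases hxL2 : x ∈ L2
        · obtain ⟨hx0, hxl⟩ := hL2mem x hxL2
          by_cases hv : gB vis x = true
          · have hft : gB (L1.foldl pvStep (vis, q)).1 x = true :=
              (c1vis x hx0 hxl).mpr (Or.inl hv)
            simp [hft, hv, hxL1, hxL2]
          · have hff : gB (L1.foldl pvStep (vis, q)).1 x = false := by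
              apply pvBoolFalse
              intro h
              rcases (c1vis x hx0 hxl).mp h with hc | hc
              · exact hv hc
              · exact hxL1 hc
            simp [hff, pvBoolFalse hv, hxL1, hxL2]
        · simp [hxL1, hxL2]

-- ---- level characterisation for A ----
theorem pvLevelChar (b n : Int) (nv : List Int) :
    ∀ (lv rest : List Int) (vis : List Bool), (vis.length : Int) = n → b ∉ lv →
      (∀ u ∈ lv, 0 ≤ u ∧ u < n) → (∀ u ∈ lv, gB vis u = true) →
      ∃ q' vis', bfsLevel b (n-1) nv (vis.length + 1) lv rest vis = some (q', vis') ∧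
        ((vis'.length : Int) = n) ∧
        (∀ x : Int, 0 ≤ x → x < n →
          (gB vis' x = true ↔ gB vis x = true ∨ ∃ u ∈ lv, pvTarg nv n u x)) ∧
        (∀ x : Int, x ∈ q' ↔ x ∈ rest ∨ (gB vis x = false ∧ ∃ u ∈ lv, pvTarg nv n u x)) := by
  intro lv
  induction lv with
  | nil =>
    intro rest vis hn _ _ _
    exact ⟨rest, vis, rfl, hn, fun x _ _ => by simp, fun x => by simp⟩
  | cons cur lv ih =>
    intro rest vis hn hb hrange hvisited
    have hcb : ¬ cur = b := fun e => hb (e ▸ List.mem_cons_self)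
    obtain ⟨hc0, hcl⟩ := hrange cur List.mem_cons_self
    obtain ⟨e_len, e_vis, e_mem⟩ := pvExpandChar nv n cur vis rest hn hc0 hcl
      (hvisited cur List.mem_cons_self)
    have hred : bfsLevel b (n-1) nv (vis.length + 1) (cur :: lv) rest vis =
        bfsLevel b (n-1) nv (vis.length + 1) lv
          (bfsWalk (n-1) (PySem.List.pyGetD nv cur 0) (vis.length + 1)
            (cur + PySem.List.pyGetD nv cur 0)
            (bfsWalk (n-1) (-(PySem.List.pyGetD nv cur 0)) (vis.length + 1)
              (cur + -(PySem.List.pyGetD nv cur 0)) (vis, rest))).2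
          (bfsWalk (n-1) (PySem.List.pyGetD nv cur 0) (vis.length + 1)
            (cur + PySem.List.pyGetD nv cur 0)
            (bfsWalk (n-1) (-(PySem.List.pyGetD nv cur 0)) (vis.length + 1)
              (cur + -(PySem.List.pyGetD nv cur 0)) (vis, rest))).1 := by
      rw [bfsLevel, if_neg hcb]
    set W := bfsWalk (n-1) (PySem.List.pyGetD nv cur 0) (vis.length + 1)
      (cur + PySem.List.pyGetD nv cur 0)
      (bfsWalk (n-1) (-(PySem.List.pyGetD nv cur 0)) (vis.length + 1)
        (cur + -(PySem.List.pyGetD nv cur 0)) (vis, rest)) with hW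
    have hWlen : (W.1.length : Int) = n := by rw [e_len]; exact hn
    obtain ⟨q', vis', hrun, hlen', hvis', hmem'⟩ := ih W.2 W.1 hWlen
      (fun e => hb (List.mem_cons_of_mem _ e))
      (fun u hu => hrange u (List.mem_cons_of_mem _ hu))
      (fun u hu => by
        rw [e_vis u (hrange u (List.mem_cons_of_mem _ hu)).1
          (hrange u (List.mem_cons_of_mem _ hu)).2]
        exact Or.inl (hvisited u (List.mem_cons_of_mem _ hu)))
    have hWwf : W.1.length + 1 = vis.length + 1 := by rw [e_len]
    rw [hWwf] at hrun
    refine ⟨q', vis', by rw [hred]; exact hrun, hlen', ?_, ?_⟩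
    · intro x hx0 hxl
      rw [hvis' x hx0 hxl, e_vis x hx0 hxl]
      simp only [List.mem_cons, exists_eq_or_imp]
      tauto
    · intro x
      rw [hmem' x]
      by_cases hx0 : 0 ≤ x
      · by_cases hxl : x < n
        · have hfold := e_vis x hx0 hxl
          rw [e_mem x]
          simp only [List.mem_cons, exists_eq_or_imp]
          by_cases hv : gB vis x = true
          · have hft : gB W.1 x = true := hfold.mpr (Or.inl hv)
            simp [hft, hv]
          · by_cases hTc : pvTarg nv n cur x
            · have hft : gB W.1 x = true := hfold.mpr (Or.inr hTc)
              simp [hft, pvBoolFalse hv]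
              tauto
            · have hff : gB W.1 x = false := by
                apply pvBoolFalse
                intro h
                rcases hfold.mp h with hc | hc
                · exact hv hc
                · exact hTc hc
              simp [hff, pvBoolFalse hv, hTc]
        · have hTall : ∀ u : Int, ¬ pvTarg nv n u x := fun u h => hxl h.2.1
          rw [e_mem x]
          simp [hTall]
      · have hTall : ∀ u : Int, ¬ pvTarg nv n u x := fun u h => hx0 (by have := h.1; omega)
        rw [e_mem x]
        simp [hTall]

-- b in the level list makes bfsLevel return none
theorem pvLevel_none {b N : Int} {nv : List Int} {wf : Nat} :
    ∀ (lv rest : List Int) (visited : List Bool), b ∈ lv →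
      bfsLevel b N nv wf lv rest visited = none := by
  intro lv
  induction lv with
  | nil => intro rest visited hb; simp at hb
  | cons cur lv ih =>
    intro rest visited hb
    rw [bfsLevel]
    by_cases hc : cur = b
    · rw [if_pos hc]
    · rw [if_neg hc]
      have : b ∈ lv := by
        rcases List.mem_cons.mp hb with h | h
        · exact absurd h.symm hc
        · exact h
      exact ih _ _ this

theorem pvLoop_nil (b N : Int) (nv : List Int) (wf : Nat) (f : Nat) (vis : List Bool) (c : Int) :
    bfsLoop b N nv wf f [] vis c = -1 := by
  cases f with
  | zero => rfl
  | succ f => rw [bfsLoop, if_pos (by simp)]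

-- ---- B's inner mark fold characterisation ----
theorem pvMarkFold_char (u k : Int) (L : List Int) :
    ∀ (nxt : List (Option Int)), (∀ v ∈ L, 0 ≤ v ∧ v < (nxt.length : Int)) →
      ((L.foldl (altMark u k) nxt).length = nxt.length) ∧
      (∀ x : Int, 0 ≤ x → x < (nxt.length : Int) →
        gD (L.foldl (altMark u k) nxt) x =
          if gD nxt x = none ∧ x ∈ L ∧ x ≠ u then some (k+1) else gD nxt x) := by
  induction L with
  | nil => intro nxt _; exact ⟨rfl, fun x _ _ => by simp⟩
  | cons v L ih =>
    intro nxt hL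
    obtain ⟨hv0, hvl⟩ := hL v List.mem_cons_self
    by_cases hset : gD nxt v = none ∧ v ≠ u
    · have hstep : altMark u k nxt v = PySem.List.pySetD nxt v (some (k+1)) := by
        unfold altMark
        rw [if_pos (show PySem.List.pyGetD nxt v none = none ∧ v ≠ u from hset)]
      rw [List.foldl_cons, hstep]
      have hlen' : (PySem.List.pySetD nxt v (some (k+1))).length = nxt.length :=
        PySem.List.length_pySetD _ _ _
      obtain ⟨ih1, ih2⟩ := ih (PySem.List.pySetD nxt v (some (k+1)))
        (fun w hw => by rw [hlen']; exact hL w (List.mem_cons_of_mem _ hw))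
      refine ⟨by rw [ih1, hlen'], ?_⟩
      intro x hx0 hxl
      rw [ih2 x hx0 (by rw [hlen']; exact hxl),
          pv_gD_setD nxt v x (some (k+1)) hv0 hvl hx0 hxl]
      by_cases hxv : x = v
      · subst hxv
        simp [hset.1, hset.2]
      · rw [if_neg hxv]
        simp only [List.mem_cons]
        split_ifs with h1 h2 <;> first | rfl | tauto
    · have hstep : altMark u k nxt v = nxt := by
        unfold altMark
        rw [if_neg (show ¬ (PySem.List.pyGetD nxt v none = none ∧ v ≠ u) from hset)]
      rw [List.foldl_cons, hstep]
      obtain ⟨ih1, ih2⟩ := ih nxt (fun w hw => hL w (List.mem_cons_of_mem _ hw))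
      refine ⟨ih1, ?_⟩
      intro x hx0 hxl
      rw [ih2 x hx0 hxl]
      simp only [List.mem_cons]
      by_cases hxv : x = v
      · subst hxv
        split_ifs with h1 h2 <;> first | rfl | tauto
      · split_ifs with h1 h2 <;> first | rfl | tauto

-- ---- B's start-of-residue-class range covers exactly pvTarg u ----
theorem pvMemStartRange (nv : List Int) (n u x : Int) (hu0 : 0 ≤ u) (hun : u < n)
    (hs : |PySem.List.pyGetD nv u 0| ≠ 0) :
    (x ∈ PySem.List.pyRange
        (if PySem.Int.mod u |PySem.List.pyGetD nv u 0| = 0 then |PySem.List.pyGetD nv u 0|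
         else PySem.Int.mod u |PySem.List.pyGetD nv u 0|) n |PySem.List.pyGetD nv u 0| ∧ x ≠ u) ↔
    pvTarg nv n u x := by
  have habs : 0 ≤ |PySem.List.pyGetD nv u 0| := abs_nonneg _
  have hmpos : 0 < |PySem.List.pyGetD nv u 0| := by omega
  have hmod : PySem.Int.mod u |PySem.List.pyGetD nv u 0| = u % |PySem.List.pyGetD nv u 0| :=
    pvModPos u _ habs
  have hr0 : 0 ≤ u % |PySem.List.pyGetD nv u 0| := Int.emod_nonneg u (by omega)
  have hrm : u % |PySem.List.pyGetD nv u 0| < |PySem.List.pyGetD nv u 0| :=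
    Int.emod_lt_of_pos u hmpos
  have hdvd_ur : |PySem.List.pyGetD nv u 0| ∣ u - u % |PySem.List.pyGetD nv u 0| :=
    ⟨u / |PySem.List.pyGetD nv u 0|, by rw [Int.emod_def]; ring⟩
  rw [hmod]
  set m := |PySem.List.pyGetD nv u 0| with hm
  set r := u % m with hr
  set start := if r = 0 then m else r with hstart
  have hstart1 : 1 ≤ start := by
    rw [hstart]; split_ifs <;> omega
  have hstartm : start ≤ m := by
    rw [hstart]; split_ifs <;> omega
  have hdvd_us : m ∣ u - start := by
    rw [hstart]
    split_ifs with h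
    · have h0 : m ∣ u := by
        have := hdvd_ur
        rw [h] at this
        simpa using this
      exact dvd_sub h0 (dvd_refl m)
    · exact hdvd_ur
  rw [PySem.List.mem_pyRange_iff_of_pos hmpos x]
  unfold pvTarg
  constructor
  · rintro ⟨⟨h1, h2, h3⟩, h4⟩
    have hd : m ∣ x - u := by
      have he : x - u = (x - start) - (u - start) := by ring
      rw [he]
      exact dvd_sub h3 hdvd_us
    refine ⟨by omega, h2, h4, ?_, hm ▸ hd⟩
    have : |PySem.List.pyGetD nv u 0| ≠ 0 := hs
    exact abs_ne_zero.mp this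
  · rintro ⟨h1, h2, h3, _, h4⟩
    have hd : m ∣ x - u := by rw [hm]; exact h4
    have hds : m ∣ x - start := by
      have he : x - start = (x - u) + (u - start) := by ring
      rw [he]
      exact dvd_add hd hdvd_us
    refine ⟨⟨?_, h2, hds⟩, h3⟩
    rcases hds with ⟨t, ht⟩
    by_cases hge : 0 ≤ t
    · have hmt : 0 ≤ m * t := mul_nonneg (by omega) hge
      omega
    · exfalso
      have ht1 : t ≤ -1 := by omega
      have hmt : m * t ≤ m * (-1) := mul_le_mul_of_nonneg_left ht1 (by omega)
      have hmm : m * (-1) = -m := by ring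
      omega

-- ---- B's round characterisation ----
set_option maxHeartbeats 1000000 in
theorem pvBodyFold_char (nv : List Int) (n k : Int) (dist : List (Option Int)) (U : List Int) :
    ∀ (nxt : List (Option Int)), (nxt.length : Int) = n → (∀ u ∈ U, 0 ≤ u ∧ u < n) →
      ((U.foldl (altBody nv n k dist) nxt).length = nxt.length) ∧
      (∀ x : Int, 0 ≤ x → x < n →
        gD (U.foldl (altBody nv n k dist) nxt) x =
          if gD nxt x = none ∧ ∃ u ∈ U, gD dist u = some k ∧ pvTarg nv n u x
          then some (k+1) else gD nxt x) := by
  induction U with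
  | nil => intro nxt hn _; exact ⟨rfl, fun x _ _ => by simp⟩
  | cons u U ih =>
    intro nxt hn hU
    obtain ⟨hu0, hul⟩ := hU u List.mem_cons_self
    rw [List.foldl_cons]
    by_cases hfront : PySem.List.pyGetD dist u none = some k
    · by_cases hs : |PySem.List.pyGetD nv u 0| ≠ 0
      · have hbody : altBody nv n k dist nxt u =
            (PySem.List.pyRange
              (if PySem.Int.mod u |PySem.List.pyGetD nv u 0| = 0 then |PySem.List.pyGetD nv u 0|
               else PySem.Int.mod u |PySem.List.pyGetD nv u 0|) n
              |PySem.List.pyGetD nv u 0|).foldl (altMark u k) nxt := by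
          unfold altBody
          rw [if_pos hfront, if_pos hs]
        have hmpos : 0 < |PySem.List.pyGetD nv u 0| := by
          have := abs_nonneg (PySem.List.pyGetD nv u 0)
          omega
        have hLmem : ∀ v ∈ PySem.List.pyRange
            (if PySem.Int.mod u |PySem.List.pyGetD nv u 0| = 0 then |PySem.List.pyGetD nv u 0|
             else PySem.Int.mod u |PySem.List.pyGetD nv u 0|) n |PySem.List.pyGetD nv u 0|,
            0 ≤ v ∧ v < (nxt.length : Int) := by
          intro v hv
          rw [PySem.List.mem_pyRange_iff_of_pos hmpos v] at hv
          have hmod : PySem.Int.mod u |PySem.List.pyGetD nv u 0| =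
              u % |PySem.List.pyGetD nv u 0| := pvModPos u _ (abs_nonneg _)
          have hr0 : 0 ≤ u % |PySem.List.pyGetD nv u 0| := Int.emod_nonneg u (by omega)
          rw [hmod] at hv
          have hst : (1:Int) ≤ (if u % |PySem.List.pyGetD nv u 0| = 0
              then |PySem.List.pyGetD nv u 0| else u % |PySem.List.pyGetD nv u 0|) := by
            split_ifs with h
            · omega
            · omega
          split_ifs at hv with h <;> omega
        obtain ⟨m1, m2⟩ := pvMarkFold_char u k _ nxt hLmem
        rw [hbody]
        obtain ⟨ih1, ih2⟩ := ih _ (by rw [m1]; exact hn)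
          (fun w hw => hU w (List.mem_cons_of_mem _ hw))
        refine ⟨by rw [ih1, m1], ?_⟩
        intro x hx0 hxl
        rw [ih2 x hx0 hxl, m2 x hx0 (by omega)]
        have hchar := pvMemStartRange nv n u x hu0 hul hs
        simp only [List.mem_cons, exists_eq_or_imp]
        by_cases hT : pvTarg nv n u x
        · have hxL : x ∈ PySem.List.pyRange
              (if PySem.Int.mod u |PySem.List.pyGetD nv u 0| = 0 then |PySem.List.pyGetD nv u 0|
               else PySem.Int.mod u |PySem.List.pyGetD nv u 0|) n |PySem.List.pyGetD nv u 0| ∧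
              x ≠ u := hchar.mpr hT
          by_cases hnone : gD nxt x = none
          · have hT1 : (if gD nxt x = none ∧ x ∈ PySem.List.pyRange
                (if PySem.Int.mod u |PySem.List.pyGetD nv u 0| = 0 then |PySem.List.pyGetD nv u 0|
                 else PySem.Int.mod u |PySem.List.pyGetD nv u 0|) n |PySem.List.pyGetD nv u 0| ∧
                x ≠ u then some (k+1) else gD nxt x) = some (k+1) :=
              if_pos ⟨hnone, hxL.1, hxL.2⟩
            rw [hT1]
            have hno : ¬ ((some (k+1) : Option Int) = none ∧
                ∃ w ∈ U, gD dist w = some k ∧ pvTarg nv n w x) := by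
              rintro ⟨h, _⟩
              simp at h
            rw [if_neg hno, if_pos ⟨hnone, Or.inl ⟨hfront, hT⟩⟩]
          · have hT1 : (if gD nxt x = none ∧ x ∈ PySem.List.pyRange
                (if PySem.Int.mod u |PySem.List.pyGetD nv u 0| = 0 then |PySem.List.pyGetD nv u 0|
                 else PySem.Int.mod u |PySem.List.pyGetD nv u 0|) n |PySem.List.pyGetD nv u 0| ∧
                x ≠ u then some (k+1) else gD nxt x) = gD nxt x :=
              if_neg (fun h => hnone h.1)
            rw [hT1, if_neg (fun h => hnone h.1), if_neg (fun h => hnone h.1)]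
        · have hxL : ¬ (x ∈ PySem.List.pyRange
              (if PySem.Int.mod u |PySem.List.pyGetD nv u 0| = 0 then |PySem.List.pyGetD nv u 0|
               else PySem.Int.mod u |PySem.List.pyGetD nv u 0|) n |PySem.List.pyGetD nv u 0| ∧
              x ≠ u) := fun h => hT (hchar.mp h)
          have hT1 : (if gD nxt x = none ∧ x ∈ PySem.List.pyRange
              (if PySem.Int.mod u |PySem.List.pyGetD nv u 0| = 0 then |PySem.List.pyGetD nv u 0|
               else PySem.Int.mod u |PySem.List.pyGetD nv u 0|) n |PySem.List.pyGetD nv u 0| ∧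
              x ≠ u then some (k+1) else gD nxt x) = gD nxt x :=
            if_neg (fun h => hxL ⟨h.2.1, h.2.2⟩)
          rw [hT1]
          refine if_congr ?_ rfl rfl
          constructor
          · rintro ⟨h1, h2⟩
            exact ⟨h1, Or.inr h2⟩
          · rintro ⟨h1, h2⟩
            rcases h2 with h2 | h2
            · exact absurd h2.2 hT
            · exact ⟨h1, h2⟩
      · have hbody : altBody nv n k dist nxt u = nxt := by
          unfold altBody
          rw [if_pos hfront, if_neg hs]
        rw [hbody]
        obtain ⟨ih1, ih2⟩ := ih nxt hn (fun w hw => hU w (List.mem_cons_of_mem _ hw))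
        refine ⟨ih1, ?_⟩
        intro x hx0 hxl
        rw [ih2 x hx0 hxl]
        have hT : ¬ pvTarg nv n u x := by
          intro h
          have hz : |PySem.List.pyGetD nv u 0| = 0 := not_ne_iff.mp hs
          exact h.2.2.2.1 (abs_eq_zero.mp hz)
        simp only [List.mem_cons, exists_eq_or_imp]
        refine if_congr ?_ rfl rfl
        constructor
        · rintro ⟨h1, h2⟩
          exact ⟨h1, Or.inr h2⟩
        · rintro ⟨h1, h2⟩
          rcases h2 with h2 | h2
          · exact absurd h2.2 hT
          · exact ⟨h1, h2⟩
    · have hbody : altBody nv n k dist nxt u = nxt := by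
        unfold altBody
        rw [if_neg hfront]
      rw [hbody]
      obtain ⟨ih1, ih2⟩ := ih nxt hn (fun w hw => hU w (List.mem_cons_of_mem _ hw))
      refine ⟨ih1, ?_⟩
      intro x hx0 hxl
      rw [ih2 x hx0 hxl]
      simp only [List.mem_cons, exists_eq_or_imp]
      have hnf : ¬ (gD dist u = some k ∧ pvTarg nv n u x) := fun h => hfront h.1
      refine if_congr ?_ rfl rfl
      constructor
      · rintro ⟨h1, h2⟩
        exact ⟨h1, Or.inr h2⟩
      · rintro ⟨h1, h2⟩
        rcases h2 with h2 | h2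
        · exact absurd h2 hnf
        · exact ⟨h1, h2⟩

theorem pvRound_char (nv : List Int) (n k : Int) (dist : List (Option Int))
    (hn : (dist.length : Int) = n) :
    ((altRound nv n k dist).length = dist.length) ∧
    (∀ x : Int, 0 ≤ x → x < n →
      gD (altRound nv n k dist) x =
        if gD dist x = none ∧ ∃ u ∈ PySem.List.pyRange 0 n 1, gD dist u = some k ∧ pvTarg nv n u x
        then some (k+1) else gD dist x) := by
  have hUmem : ∀ u ∈ PySem.List.pyRange 0 n 1, 0 ≤ u ∧ u < n := by
    intro u hu
    rw [PySem.List.mem_pyRange_iff_of_pos (by omega : (0:Int) < 1) u] at hu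
    omega
  obtain ⟨h1, h2⟩ := pvBodyFold_char nv n k dist (PySem.List.pyRange 0 n 1) dist hn hUmem
  exact ⟨h1, h2⟩

-- ---- the lockstep theorem ----
set_option maxHeartbeats 1000000 in
theorem pvLock (nv : List Int) (b : Int) :
    ∀ (fuel : Nat) (queue : List Int) (vis : List Bool) (dist : List (Option Int)) (k : Int),
      pvInv b (nv.length : Int) queue vis dist k →
      bfsLoop b ((nv.length : Int) - 1) nv (nv.length + 1) fuel queue vis k =
        altLoop b (nv.length : Int) nv fuel dist k := by
  intro fuel
  induction fuel with
  | zero => intro queue vis dist k _; rfl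
  | succ f ih =>
    intro queue vis dist k hinv
    obtain ⟨hvl, hdl, hk0, hvd, hfront, hqr, hbound, hbq⟩ := hinv
    rw [bfsLoop, altLoop]
    by_cases hbin : b ∈ queue
    · -- A returns count; B returns dist[b] = k
      obtain ⟨hb0, hbl⟩ := hqr b hbin
      have hbk : gD dist b = some k := (hfront b hb0 hbl).mpr hbin
      have hne : ¬ queue.isEmpty = true := by
        intro he
        rw [List.isEmpty_iff] at he
        rw [he] at hbin
        simp at hbin
      have htop : (if 0 ≤ b ∧ b < (nv.length : Int) then PySem.List.pyGetD dist b none else none) = some k := by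
        rw [if_pos ⟨hb0, hbl⟩]
        exact hbk
      rw [if_neg hne, pvLevel_none _ _ _ hbin, htop]
    · have htop : (if 0 ≤ b ∧ b < (nv.length : Int) then PySem.List.pyGetD dist b none else none) = none := by
        by_cases hbr : 0 ≤ b ∧ b < (nv.length : Int)
        · rw [if_pos hbr]
          rcases hbq hbr.1 hbr.2 with h | h
          · exact h
          · exact absurd h hbin
        · rw [if_neg hbr]
      rw [htop]
      obtain ⟨r_len, r_char⟩ := pvRound_char nv (nv.length : Int) k dist hdl
      have hmemrange : ∀ u : Int, u ∈ PySem.List.pyRange 0 (nv.length : Int) 1 ↔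
          (0 ≤ u ∧ u < (nv.length : Int)) := by
        intro u
        rw [PySem.List.mem_pyRange_iff_of_pos (by omega : (0:Int) < 1) u]
        constructor
        · rintro ⟨h1, h2, _⟩; exact ⟨h1, h2⟩
        · rintro ⟨h1, h2⟩; exact ⟨h1, h2, one_dvd _⟩
      have hfr : ∀ x : Int,
          (∃ u ∈ PySem.List.pyRange 0 (nv.length : Int) 1, gD dist u = some k ∧ pvTarg nv (nv.length : Int) u x) ↔
          (∃ u ∈ queue, pvTarg nv (nv.length : Int) u x) := by
        intro x
        constructor
        · rintro ⟨u, hu, h2, h3⟩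
          obtain ⟨h0, h1⟩ := (hmemrange u).mp hu
          exact ⟨u, (hfront u h0 h1).mp h2, h3⟩
        · rintro ⟨u, hu, h3⟩
          obtain ⟨h0, h1⟩ := hqr u hu
          exact ⟨u, (hmemrange u).mpr ⟨h0, h1⟩, (hfront u h0 h1).mpr hu, h3⟩
      by_cases hqe : queue.isEmpty
      · -- empty frontier: A returns -1; B's round changes nothing, so B returns -1
        have hnilq : queue = [] := List.isEmpty_iff.mp hqe
        have hnx : altRound nv (nv.length : Int) k dist = dist := by
          apply pv_eq_of_getD r_len
          intro x hx0 hxl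
          have hno : ¬ (gD dist x = none ∧ ∃ u ∈ PySem.List.pyRange 0 (nv.length : Int) 1,
              gD dist u = some k ∧ pvTarg nv (nv.length : Int) u x) := by
            rintro ⟨_, u, hu, h2, _⟩
            obtain ⟨h0, h1⟩ := (hmemrange u).mp hu
            have := (hfront u h0 h1).mp h2
            rw [hnilq] at this
            simp at this
          rw [r_char x hx0 (by omega), if_neg hno]
        rw [if_pos hqe]
        show (-1 : Int) = if altRound nv (nv.length : Int) k dist = dist then -1
            else altLoop b (nv.length : Int) nv f (altRound nv (nv.length : Int) k dist) (k+1)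
        rw [if_pos hnx]
      · rw [if_neg hqe]
        have hql : ∀ u ∈ queue, gB vis u = true := by
          intro u hu
          obtain ⟨h0, h1⟩ := hqr u hu
          rw [hvd u h0 h1, (hfront u h0 h1).mpr hu]
          simp
        obtain ⟨q', vis', hrun, hlen', hvis', hmem'⟩ :=
          pvLevelChar b (nv.length : Int) nv queue [] vis hvl hbin hqr hql
        have hvnv : vis.length = nv.length := by omega
        rw [hvnv] at hrun
        rw [hrun]
        show bfsLoop b ((nv.length : Int) - 1) nv (nv.length + 1) f q' vis' (k + 1) =
          if altRound nv (nv.length : Int) k dist = dist then -1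
          else altLoop b (nv.length : Int) nv f (altRound nv (nv.length : Int) k dist) (k+1)
        have hnew : ∀ x : Int, x ∈ q' ↔
            (0 ≤ x ∧ x < (nv.length : Int) ∧ gD dist x = none ∧
              ∃ u ∈ queue, pvTarg nv (nv.length : Int) u x) := by
          intro x
          rw [hmem' x]
          simp only [List.not_mem_nil, false_or]
          constructor
          · rintro ⟨hvx, u, hu, hT⟩
            have hx0 : (0:Int) ≤ x := by have := hT.1; omega
            have hxl : x < (nv.length : Int) := hT.2.1
            refine ⟨hx0, hxl, ?_, u, hu, hT⟩
            by_contra hne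
            have := (hvd x hx0 hxl).mpr hne
            rw [hvx] at this
            simp at this
          · rintro ⟨hx0, hxl, hnone, u, hu, hT⟩
            refine ⟨?_, u, hu, hT⟩
            apply pvBoolFalse
            intro h
            exact absurd ((hvd x hx0 hxl).mp h) (by simp [hnone])
        have hnxt_char : ∀ x : Int, 0 ≤ x → x < (nv.length : Int) →
            gD (altRound nv (nv.length : Int) k dist) x =
              if x ∈ q' then some (k+1) else gD dist x := by
          intro x hx0 hxl
          rw [r_char x hx0 hxl]
          by_cases hq'x : x ∈ q'
          · rw [if_pos hq'x]
            obtain ⟨_, _, hnone, hex⟩ := (hnew x).mp hq'x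
            have hyes : gD dist x = none ∧ ∃ u ∈ PySem.List.pyRange 0 (nv.length : Int) 1,
                gD dist u = some k ∧ pvTarg nv (nv.length : Int) u x :=
              ⟨hnone, (hfr x).mpr hex⟩
            rw [if_pos hyes]
          · rw [if_neg hq'x]
            have hno : ¬ (gD dist x = none ∧ ∃ u ∈ PySem.List.pyRange 0 (nv.length : Int) 1,
                gD dist u = some k ∧ pvTarg nv (nv.length : Int) u x) := by
              rintro ⟨hnone, hex⟩
              exact hq'x ((hnew x).mpr ⟨hx0, hxl, hnone, (hfr x).mp hex⟩)
            rw [if_neg hno]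
        by_cases hq'e : q' = []
        · have hnx : altRound nv (nv.length : Int) k dist = dist := by
            apply pv_eq_of_getD r_len
            intro x hx0 hxl
            rw [hnxt_char x hx0 (by omega), if_neg (by rw [hq'e]; simp)]
          rw [if_pos hnx, hq'e, pvLoop_nil]
        · have hnxd : ¬ altRound nv (nv.length : Int) k dist = dist := by
            intro he
            apply hq'e
            rcases List.exists_mem_of_ne_nil q' hq'e with ⟨x, hx⟩
            exfalso
            obtain ⟨hx0, hxl, hnone, _⟩ := (hnew x).mp hx
            have hc := hnxt_char x hx0 hxl
            rw [if_pos hx, he, hnone] at hc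
            simp at hc
          rw [if_neg hnxd]
          apply ih q' vis' (altRound nv (nv.length : Int) k dist) (k+1)
          refine ⟨hlen', by rw [r_len]; exact hdl, by omega, ?_, ?_, ?_, ?_, ?_⟩
          · intro x hx0 hxl
            rw [hvis' x hx0 hxl, hnxt_char x hx0 hxl]
            by_cases hq'x : x ∈ q'
            · simp only [if_pos hq'x]
              obtain ⟨_, _, _, hex⟩ := (hnew x).mp hq'x
              simp [hex]
            · rw [if_neg hq'x, hvd x hx0 hxl]
              constructor
              · rintro (h | hex)
                · exact h
                · intro hnone
                  exact hq'x ((hnew x).mpr ⟨hx0, hxl, hnone, hex⟩)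
              · intro h
                exact Or.inl h
          · intro x hx0 hxl
            rw [hnxt_char x hx0 hxl]
            by_cases hq'x : x ∈ q'
            · simp [hq'x]
            · rw [if_neg hq'x]
              constructor
              · intro h
                obtain ⟨h0, h1⟩ := hbound x (k+1) hx0 hxl h
                omega
              · intro h
                exact absurd h hq'x
          · intro x hx
            have := (hnew x).mp hx
            exact ⟨this.1, this.2.1⟩
          · intro x j hx0 hxl hj
            rw [hnxt_char x hx0 hxl] at hj
            by_cases hq'x : x ∈ q'
            · rw [if_pos hq'x] at hj
              injection hj with hj
              omega
            · rw [if_neg hq'x] at hj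
              obtain ⟨h0, h1⟩ := hbound x j hx0 hxl hj
              omega
          · intro hb0 hbl
            rw [hnxt_char b hb0 hbl]
            by_cases hq'b : b ∈ q'
            · exact Or.inr hq'b
            · rw [if_neg hq'b]
              left
              rcases hbq hb0 hbl with h | h
              · exact h
              · exact absurd h hbin

-- ===== VERDICT (by name: the statement is the Claim_ definition above) =====
theorem bfs_spec : Claim_equal_bfs := by
  intro a b nv hdom hpre
  obtain ⟨ha0, hal, hz⟩ := hpre
  unfold Spec_bfs bfs bfs_alt
  show bfsLoop b ((nv.length : Int) - 1) nv (nv.length + 1) (nv.length + 2) [a]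
        (PySem.List.pySetD (List.replicate nv.length false) a true) 0
      = altLoop b (nv.length : Int) nv (nv.length + 2)
        (PySem.List.pySetD (List.replicate nv.length (none : Option Int)) a (some 0)) 0
  apply pvLock nv b
  have halN : a < ((List.replicate nv.length false).length : Int) := by
    simpa using hal
  have halD : a < ((List.replicate nv.length (none : Option Int)).length : Int) := by
    simpa using hal
  have hgB : ∀ x : Int, 0 ≤ x → x < (nv.length : Int) →
      gB (PySem.List.pySetD (List.replicate nv.length false) a true) x =
        (if x = a then true else false) := by
    intro x hx0 hxl
    rw [pv_gB_setD _ a x true ha0 halN hx0 (by simpa using hxl)]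
    by_cases h : x = a
    · rw [if_pos h, if_pos h]
    · rw [if_neg h, if_neg h]
      unfold gB
      rw [PySem.List.pyGetD_eq_getElem _ _ hx0 (by simpa using hxl)]
      simp
  have hgD : ∀ x : Int, 0 ≤ x → x < (nv.length : Int) →
      gD (PySem.List.pySetD (List.replicate nv.length (none : Option Int)) a (some 0)) x =
        (if x = a then some 0 else none) := by
    intro x hx0 hxl
    rw [pv_gD_setD _ a x (some 0) ha0 halD hx0 (by simpa using hxl)]
    by_cases h : x = a
    · rw [if_pos h, if_pos h]
    · rw [if_neg h, if_neg h]
      unfold gD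
      rw [PySem.List.pyGetD_eq_getElem _ _ hx0 (by simpa using hxl)]
      simp
  refine ⟨by simp [PySem.List.length_pySetD], by simp [PySem.List.length_pySetD],
    le_refl 0, ?_, ?_, ?_, ?_, ?_⟩
  · intro x hx0 hxl
    rw [hgB x hx0 hxl, hgD x hx0 hxl]
    by_cases h : x = a
    · simp [h]
    · simp [h]
  · intro x hx0 hxl
    rw [hgD x hx0 hxl]
    by_cases h : x = a
    · simp [h]
    · simp [h]
  · intro x hx
    have hxa : x = a := by simpa using hx
    subst hxa
    exact ⟨ha0, hal⟩
  · intro x j hx0 hxl hj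
    rw [hgD x hx0 hxl] at hj
    by_cases h : x = a
    · rw [if_pos h] at hj
      injection hj with hj
      omega
    · rw [if_neg h] at hj
      simp at hj
  · intro hb0 hbl
    rw [hgD b hb0 hbl]
    by_cases h : b = a
    · right
      simp [h]
    · left
      rw [if_neg h]
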